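-- pv_equiv track=rewrite | github.com/epilectrik/voynich | phases/AZC_REACHABILITY_SUPPRESSION/reachability_analysis.py | build_base_reachability_graph
-- ===== SOURCE A (Python) =====
-- from typing import Dict, Set, List, Tuple, Optional
--
-- def build_base_reachability_graph(
--     num_classes: int,
--     forbidden_class_pairs: Set[Tuple[int, int]]
-- ) -> Dict[int, Set[int]]:
--     """
--     Build the base reachability graph G0.
--
--     Nodes: 49 instruction classes
--     Edges: All class->class transitions EXCEPT forbidden pairs
--
--     Note: Bidirectional - if (A, B) is forbidden, so is (B, A)
--     """
--     graph = {i: set() for i in range(1, num_classes + 1)}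
--
--     for from_class in range(1, num_classes + 1):
--         for to_class in range(1, num_classes + 1):
--             if from_class == to_class:
--                 continue
--             # Check both directions for bidirectional forbidden pairs
--             if (from_class, to_class) not in forbidden_class_pairs and \
--                (to_class, from_class) not in forbidden_class_pairs:
--                 graph[from_class].add(to_class)
--
--     return graph
-- ===== SOURCE B (Python) =====
-- def build_base_reachability_graph(num_classes, forbidden_class_pairs):
--     # Dense complement build, then one subtractive pass over the forbidden pairs.
--     graph = {i: set(range(1, num_classes + 1)) - {i}
--              for i in range(1, num_classes + 1)}
--     for a, b in forbidden_class_pairs: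
--         if a in graph:
--             graph[a].discard(b)
--         if b in graph:
--             graph[b].discard(a)
--     return graph
-- ===== Notes on version B (the rewrite author's own statement) =====
-- stated objective: alternative
-- what changed: Instead of testing every ordered pair against the forbidden set in an n² membership-filtering double loop, B builds each adjacency as the dense complement set(range)-{i} and then deletes forbidden edges in one subtractive pass over forbidden_class_pairs.
import Mathlib
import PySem

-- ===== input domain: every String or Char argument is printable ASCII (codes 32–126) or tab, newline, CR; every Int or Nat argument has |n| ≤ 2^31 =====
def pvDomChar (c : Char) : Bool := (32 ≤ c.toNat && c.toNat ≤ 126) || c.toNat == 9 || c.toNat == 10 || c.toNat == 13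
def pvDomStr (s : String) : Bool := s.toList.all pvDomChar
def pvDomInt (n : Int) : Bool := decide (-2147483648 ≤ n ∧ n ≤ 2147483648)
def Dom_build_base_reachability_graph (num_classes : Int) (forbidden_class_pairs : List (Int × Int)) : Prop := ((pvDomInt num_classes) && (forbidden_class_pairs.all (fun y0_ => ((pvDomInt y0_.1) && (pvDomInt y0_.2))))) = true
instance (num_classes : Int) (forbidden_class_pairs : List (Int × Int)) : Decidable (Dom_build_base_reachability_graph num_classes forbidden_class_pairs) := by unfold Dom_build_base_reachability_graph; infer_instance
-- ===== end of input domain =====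

-- B replaces A's n² membership-filtered double loop by a dense complement build plus one
-- subtractive pass over the forbidden pairs (objective: alternative decomposition, same results).

-- ===== PORT A =====
def build_base_reachability_graph (num_classes : Int) (forbidden_class_pairs : List (Int × Int)) : List (Int × List Int) :=
  -- graph = {i: set() for i in range(1, num_classes + 1)}
  let graph : PySem.Dict Int (PySem.Set Int) :=
    (PySem.List.pyRange 1 (num_classes + 1) 1).foldl
      (fun d i => d.insert i PySem.Set.empty) PySem.Dict.empty
  -- for from_class in range: for to_class in range: …
  let graph :=
    (PySem.List.pyRange 1 (num_classes + 1) 1).foldl (fun g fc =>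
      (PySem.List.pyRange 1 (num_classes + 1) 1).foldl (fun g tc =>
        if fc == tc then g   -- continue
        else if !forbidden_class_pairs.contains (fc, tc) && !forbidden_class_pairs.contains (tc, fc) then
          g.modify fc PySem.Set.empty (fun s => PySem.Set.add s tc)   -- graph[from_class].add(to_class)
        else g) g) graph
  graph.items

-- ===== PORT B =====
def build_base_reachability_graph_alt (num_classes : Int) (forbidden_class_pairs : List (Int × Int)) : List (Int × List Int) :=
  -- graph = {i: set(range(1, num_classes + 1)) - {i} for i in range(1, num_classes + 1)}
  let graph : PySem.Dict Int (PySem.Set Int) :=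
    (PySem.List.pyRange 1 (num_classes + 1) 1).foldl
      (fun d i => d.insert i
        (PySem.Set.diff (PySem.Set.ofList (PySem.List.pyRange 1 (num_classes + 1) 1))
          (PySem.Set.ofList [i]))) PySem.Dict.empty
  -- for a, b in forbidden_class_pairs: if a in graph: graph[a].discard(b); if b in graph: graph[b].discard(a)
  let graph :=
    forbidden_class_pairs.foldl (fun g p =>
      let g1 := if g.contains p.1 then g.modify p.1 PySem.Set.empty (fun s => PySem.Set.discard s p.2) else g
      if g1.contains p.2 then g1.modify p.2 PySem.Set.empty (fun s => PySem.Set.discard s p.1) else g1) graph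
  graph.items

-- ===== PRECONDITION & SPEC =====
def Spec_build_base_reachability_graph (num_classes : Int) (forbidden_class_pairs : List (Int × Int)) (out : List (Int × List Int)) : Prop := out = build_base_reachability_graph_alt num_classes forbidden_class_pairs
instance (num_classes : Int) (forbidden_class_pairs : List (Int × Int)) (out : List (Int × List Int)) : Decidable (Spec_build_base_reachability_graph num_classes forbidden_class_pairs out) := by unfold Spec_build_base_reachability_graph; infer_instance

-- ===== CLAIM (what is proved, stated in full; the proofs are below) =====
def Claim_equal_build_base_reachability_graph : Prop := ∀ (num_classes : Int) (forbidden_class_pairs : List (Int × Int)), Dom_build_base_reachability_graph num_classes forbidden_class_pairs → Spec_build_base_reachability_graph num_classes forbidden_class_pairs (build_base_reachability_graph num_classes forbidden_class_pairs)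

-- ===== LEMMAS AND PROOFS =====

-- proof-only helper names for A's loops (AInner/AVal) and B's loops (BStep/BVal)
def AInner (P : List (Int × Int)) (fc : Int) (R : List Int)
    (g : PySem.Dict Int (PySem.Set Int)) : PySem.Dict Int (PySem.Set Int) :=
  R.foldl (fun g tc =>
    if fc == tc then g
    else if !P.contains (fc, tc) && !P.contains (tc, fc) then
      g.modify fc PySem.Set.empty (fun s => PySem.Set.add s tc)
    else g) g

def AVal (P : List (Int × Int)) (fc : Int) (R : List Int) (s : PySem.Set Int) : PySem.Set Int :=
  R.foldl (fun s tc =>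
    if fc == tc then s
    else if !P.contains (fc, tc) && !P.contains (tc, fc) then PySem.Set.add s tc
    else s) s

theorem pv_A_inner_getD (P : List (Int × Int)) (fc : Int) (ts : List Int)
    (g : PySem.Dict Int (PySem.Set Int)) (i : Int) :
    ((AInner P fc ts g).getD i [])
      = if i = fc then AVal P fc ts (g.getD fc []) else g.getD i [] := by
  induction ts generalizing g with
  | nil =>
      simp only [AInner, AVal, List.foldl_nil]
      by_cases h : i = fc <;> simp [h]
  | cons t ts ih =>
      simp only [AInner, AVal, List.foldl_cons] at *
      by_cases h1 : (fc == t) = true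
      · simp only [h1, if_true]; exact ih g
      · have h1f : (fc == t) = false := by simpa using h1
        by_cases h2 : (!P.contains (fc, t) && !P.contains (t, fc)) = true
        · simp only [h1f, Bool.false_eq_true, if_false, h2, if_true, ih,
            PySem.Dict.getD_modify]
          by_cases h3 : i = fc <;> simp [h3, PySem.Dict.getD_modify]
        · have h2f : (!P.contains (fc, t) && !P.contains (t, fc)) = false := by simpa using h2
          simp only [h1f, Bool.false_eq_true, if_false, h2f, ih]


theorem pv_A_outer_getD (P : List (Int × Int)) (R : List Int) (l : List Int) (hl : l.Nodup)
    (g : PySem.Dict Int (PySem.Set Int)) (i : Int) :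
    ((l.foldl (fun g fc => AInner P fc R g) g).getD i [])
      = if i ∈ l then AVal P i R (g.getD i []) else g.getD i [] := by
  induction l generalizing g with
  | nil => simp
  | cons fc l ih =>
      simp only [List.foldl_cons, List.mem_cons]
      rw [ih hl.of_cons]
      by_cases h1 : i ∈ l
      · have hne : i ≠ fc := by rintro rfl; exact (List.nodup_cons.mp hl).1 h1
        rw [if_pos h1, if_pos (Or.inr h1), pv_A_inner_getD, if_neg hne]
      · by_cases h2 : i = fc
        · subst h2
          rw [if_neg h1, if_pos (Or.inl rfl), pv_A_inner_getD, if_pos rfl]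
        · rw [if_neg h1, if_neg (by tauto), pv_A_inner_getD, if_neg h2]

def BStep (g : PySem.Dict Int (PySem.Set Int)) (p : Int × Int) : PySem.Dict Int (PySem.Set Int) :=
  let g1 := if g.contains p.1 then g.modify p.1 PySem.Set.empty (fun s => PySem.Set.discard s p.2) else g
  if g1.contains p.2 then g1.modify p.2 PySem.Set.empty (fun s => PySem.Set.discard s p.1) else g1

def BVal (i : Int) (s : PySem.Set Int) (p : Int × Int) : PySem.Set Int :=
  let s1 := if i = p.1 then PySem.Set.discard s p.2 else s
  if i = p.2 then PySem.Set.discard s1 p.1 else s1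

theorem pv_B_one_keys (g : PySem.Dict Int (PySem.Set Int)) (k x : Int) :
    ((if g.contains k then g.modify k PySem.Set.empty (fun s => PySem.Set.discard s x) else g).keys) = g.keys := by
  by_cases h : g.contains k = true
  · rw [if_pos h, PySem.Dict.keys_modify, PySem.Dict.keys_insert_of_contains _ _ h]
  · rw [if_neg h]

theorem pv_B_one_getD (g : PySem.Dict Int (PySem.Set Int)) (k x i : Int) (hi : i ∈ g.keys) :
    ((if g.contains k then g.modify k PySem.Set.empty (fun s => PySem.Set.discard s x) else g).getD i [])
      = if i = k then PySem.Set.discard (g.getD i []) x else g.getD i [] := by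
  by_cases h : g.contains k = true
  · rw [if_pos h]
    have := PySem.Dict.getD_modify (d := g) (k := k) (k' := i) (d0 := ([] : PySem.Set Int))
      (f := fun s => PySem.Set.discard s x)
    simp only [PySem.Set.empty] at *
    rw [this]
    by_cases h2 : i = k
    · subst h2; simp
    · simp [h2]
  · rw [if_neg h]
    have hk : i ≠ k := by
      rintro rfl; exact h ((PySem.Dict.contains_iff_mem_keys g i).mpr hi)
    rw [if_neg hk]

theorem pv_B_step_keys (g : PySem.Dict Int (PySem.Set Int)) (p : Int × Int) :
    (BStep g p).keys = g.keys := by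
  unfold BStep
  rw [pv_B_one_keys, pv_B_one_keys]

theorem pv_B_step_getD (g : PySem.Dict Int (PySem.Set Int)) (p : Int × Int) (i : Int)
    (hi : i ∈ g.keys) : (BStep g p).getD i [] = BVal i (g.getD i []) p := by
  unfold BStep BVal
  rw [pv_B_one_getD _ _ _ _ (by rw [pv_B_one_keys]; exact hi),
      pv_B_one_getD _ _ _ _ hi]

theorem pv_B_fold_getD (ps : List (Int × Int)) (g : PySem.Dict Int (PySem.Set Int)) (i : Int)
    (hi : i ∈ g.keys) :
    (ps.foldl BStep g).getD i [] = ps.foldl (BVal i) (g.getD i []) := by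
  induction ps generalizing g with
  | nil => rfl
  | cons p ps ih =>
      simp only [List.foldl_cons]
      rw [ih _ (by rw [pv_B_step_keys]; exact hi), pv_B_step_getD _ _ _ hi]

theorem pv_BVal_filter (i : Int) (s : PySem.Set Int) (p : Int × Int) :
    BVal i s p = s.filter (fun t => !((p.1 == i && p.2 == t) || (p.2 == i && p.1 == t))) := by
  unfold BVal PySem.Set.discard
  by_cases hA : i = p.1
  · by_cases hB : i = p.2
    · rw [if_pos hA, if_pos hB, List.filter_filter]
      apply List.filter_congr; intro t _
      simp [← hA, ← hB, beq_iff_eq, eq_comm]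
    · rw [if_pos hA, if_neg hB]
      apply List.filter_congr; intro t _
      have : (p.2 == i) = false := by simp [beq_iff_eq]; omega
      simp [← hA, this, beq_iff_eq, eq_comm]
  · by_cases hB : i = p.2
    · rw [if_neg hA, if_pos hB]
      apply List.filter_congr; intro t _
      have : (p.1 == i) = false := by simp [beq_iff_eq]; omega
      simp [← hB, this, beq_iff_eq, eq_comm]
    · rw [if_neg hA, if_neg hB]
      have h1 : (p.1 == i) = false := by simp [beq_iff_eq]; omega
      have h2 : (p.2 == i) = false := by simp [beq_iff_eq]; omega
      simp [h1, h2]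

theorem pv_B_fold_filter (i : Int) (ps : List (Int × Int)) (s : PySem.Set Int) :
    ps.foldl (BVal i) s
      = s.filter (fun t => ps.all (fun p => !((p.1 == i && p.2 == t) || (p.2 == i && p.1 == t)))) := by
  induction ps generalizing s with
  | nil => simp
  | cons p ps ih =>
      rw [List.foldl_cons, ih, pv_BVal_filter, List.filter_filter]
      apply List.filter_congr; intro t _
      simp [List.all_cons, Bool.and_comm]

theorem pv_AVal_filter (P : List (Int × Int)) (i : Int) (R : List Int) (hR : R.Nodup) :
    AVal P i R []
      = R.filter (fun t => !(i == t) && (!P.contains (i, t) && !P.contains (t, i))) := by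
  unfold AVal
  have hstep : (fun (s : PySem.Set Int) tc =>
      if i == tc then s
      else if !P.contains (i, tc) && !P.contains (tc, i) then PySem.Set.add s tc else s)
      = (fun (s : PySem.Set Int) tc =>
        if (!(i == tc) && (!P.contains (i, tc) && !P.contains (tc, i))) = true then PySem.Set.add s tc else s) := by
    funext s tc
    by_cases h1 : (i == tc) = true
    · simp [h1]
    · have h1f : (i == tc) = false := by simpa using h1
      simp only [h1f, Bool.false_eq_true, if_false, Bool.not_false, Bool.true_and]
  rw [hstep, PySem.List.foldl_if_eq_foldl_filter, ← PySem.Set.ofList_eq_foldl,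
    PySem.Set.ofList_eq_self_of_nodup _ (hR.filter _)]

theorem pv_perkey (P : List (Int × Int)) (R : List Int) (hR : R.Nodup) (i : Int) :
    AVal P i R []
      = P.foldl (BVal i) (PySem.Set.diff (PySem.Set.ofList R) (PySem.Set.ofList [i])) := by
  rw [pv_B_fold_filter, pv_AVal_filter P i R hR]
  unfold PySem.Set.diff
  rw [PySem.Set.ofList_eq_self_of_nodup _ hR, List.filter_filter]
  apply List.filter_congr; intro t _
  by_cases hti : i = t
  · subst hti; simp
  · have h1 : (i == t) = false := by simp [beq_iff_eq]; omega
    have h2 : (t == i) = false := by simp [beq_iff_eq]; omega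
    simp only [h1, Bool.not_false, Bool.true_and]
    have hc : (PySem.Set.ofList [i]).contains t = false := by
      simp [PySem.Set.ofList, PySem.Set.add, PySem.Set.empty, beq_iff_eq]; omega
    rw [hc]
    simp only [Bool.not_false, Bool.and_true]
    rw [← Bool.coe_iff_coe]
    simp only [Bool.and_eq_true, Bool.not_eq_true', List.all_eq_true,
      List.contains_eq_mem, decide_eq_false_iff_not, Bool.not_eq_true,
      Bool.or_eq_false_iff, Bool.and_eq_false_iff]
    constructor
    · rintro ⟨ha, hb⟩ p hp
      constructor
      · by_cases e1 : p.1 = i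
        · right; simp [beq_iff_eq]; intro e2
          exact ha (by cases p; simp_all)
        · left; simp [beq_iff_eq, e1]
      · by_cases e2 : p.2 = i
        · right; simp [beq_iff_eq]; intro e1
          exact hb (by cases p; simp_all)
        · left; simp [beq_iff_eq, e2]
    · intro h
      constructor
      · intro hmem
        rcases h _ hmem with ⟨c1, c2⟩
        simp [beq_iff_eq] at c1 c2
      · intro hmem
        rcases h _ hmem with ⟨c1, c2⟩
        simp [beq_iff_eq] at c1 c2

theorem pv_A_inner_keys (P : List (Int × Int)) (fc : Int) (ts : List Int)
    (g : PySem.Dict Int (PySem.Set Int)) (hfc : fc ∈ g.keys) :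
    ((AInner P fc ts g).keys) = g.keys := by
  induction ts generalizing g with
  | nil => rfl
  | cons t ts ih =>
      simp only [AInner, List.foldl_cons] at *
      by_cases h1 : (fc == t) = true
      · simp only [h1, if_true]; exact ih g hfc
      · have h1f : (fc == t) = false := by simpa using h1
        by_cases h2 : (!P.contains (fc, t) && !P.contains (t, fc)) = true
        · simp only [h1f, Bool.false_eq_true, if_false, h2, if_true]
          have hc : g.contains fc = true := (PySem.Dict.contains_iff_mem_keys g fc).mpr hfc
          have hk : (g.modify fc PySem.Set.empty (fun s => PySem.Set.add s t)).keys = g.keys := by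
            rw [PySem.Dict.keys_modify, PySem.Dict.keys_insert_of_contains _ _ hc]
          rw [ih _ (by rw [hk]; exact hfc), hk]
        · have h2f : (!P.contains (fc, t) && !P.contains (t, fc)) = false := by simpa using h2
          simp only [h1f, Bool.false_eq_true, if_false, h2f]; exact ih g hfc

theorem pv_A_outer_keys (P : List (Int × Int)) (R : List Int) (l : List Int)
    (g : PySem.Dict Int (PySem.Set Int)) (h : ∀ fc ∈ l, fc ∈ g.keys) :
    ((l.foldl (fun g fc => AInner P fc R g) g).keys) = g.keys := by
  induction l generalizing g with
  | nil => rfl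
  | cons fc l ih =>
      rw [List.foldl_cons]
      have hk := pv_A_inner_keys P fc R g (h fc (by simp))
      rw [ih _ (fun x hx => by rw [hk]; exact h x (by simp [hx])), hk]

theorem pv_B_fold_keys (ps : List (Int × Int)) (g : PySem.Dict Int (PySem.Set Int)) :
    ((ps.foldl BStep g).keys) = g.keys := by
  induction ps generalizing g with
  | nil => rfl
  | cons p ps ih => rw [List.foldl_cons, ih, pv_B_step_keys]

theorem pv_getD_foldl_insert (l : List Int) (v : Int → PySem.Set Int)
    (d : PySem.Dict Int (PySem.Set Int)) (i : Int) :
    ((l.foldl (fun d x => d.insert x (v x)) d).getD i [])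
      = if i ∈ l then v i else d.getD i [] := by
  induction l generalizing d with
  | nil => simp
  | cons x l ih =>
      simp only [List.foldl_cons, ih, PySem.Dict.getD_insert, List.mem_cons]
      by_cases h1 : i ∈ l <;> by_cases h2 : i = x <;> simp [h1, h2]

theorem pv_keys_init (l : List Int) (hl : l.Nodup) (v : Int → PySem.Set Int) :
    ((l.foldl (fun d x => d.insert x (v x)) PySem.Dict.empty).keys : List Int) = l := by
  have h := PySem.Dict.keys_foldl_insert (ν := PySem.Set Int) l (fun _ x => v x) PySem.Dict.empty
  simp only [h, PySem.Dict.keys_empty, PySem.Set.update_nil_left,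
    PySem.Set.ofList_eq_self_of_nodup _ hl]


theorem pv_main (n : Int) (P : List (Int × Int)) : build_base_reachability_graph n P = build_base_reachability_graph_alt n P := by
  unfold build_base_reachability_graph build_base_reachability_graph_alt
  have hR : (PySem.List.pyRange 1 (n + 1) 1).Nodup := PySem.List.nodup_pyRange_one 1 (n + 1)
  set R := PySem.List.pyRange 1 (n + 1) 1 with hRdef
  -- name the two final dicts
  show (R.foldl (fun g fc => AInner P fc R g)
          (R.foldl (fun d i => d.insert i PySem.Set.empty) PySem.Dict.empty)).items
      = (P.foldl BStep
          (R.foldl (fun d i => d.insert i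
            (PySem.Set.diff (PySem.Set.ofList R) (PySem.Set.ofList [i]))) PySem.Dict.empty)).items
  have hkA : (R.foldl (fun g fc => AInner P fc R g)
      (R.foldl (fun d i => d.insert i PySem.Set.empty) PySem.Dict.empty)).keys = R := by
    rw [pv_A_outer_keys, pv_keys_init R hR]
    intro fc hfc
    rw [pv_keys_init R hR]; exact hfc
  have hkB : (P.foldl BStep
      (R.foldl (fun d i => d.insert i
        (PySem.Set.diff (PySem.Set.ofList R) (PySem.Set.ofList [i]))) PySem.Dict.empty)).keys = R := by
    rw [pv_B_fold_keys, pv_keys_init R hR]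
  rw [PySem.Dict.items_eq_map_keys _ (by rw [hkA]; exact hR) ([] : PySem.Set Int),
      PySem.Dict.items_eq_map_keys _ (by rw [hkB]; exact hR) ([] : PySem.Set Int),
      hkA, hkB]
  apply List.map_congr_left
  intro k hk
  have hA : (R.foldl (fun g fc => AInner P fc R g)
      (R.foldl (fun d i => d.insert i PySem.Set.empty) PySem.Dict.empty)).getD k []
      = AVal P k R [] := by
    rw [pv_A_outer_getD P R R hR _ k, if_pos hk, pv_getD_foldl_insert, if_pos hk]
    rfl
  have hB : (P.foldl BStep
      (R.foldl (fun d i => d.insert i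
        (PySem.Set.diff (PySem.Set.ofList R) (PySem.Set.ofList [i]))) PySem.Dict.empty)).getD k []
      = P.foldl (BVal k) (PySem.Set.diff (PySem.Set.ofList R) (PySem.Set.ofList [k])) := by
    rw [pv_B_fold_getD P _ k (by rw [pv_keys_init R hR]; exact hk),
        pv_getD_foldl_insert, if_pos hk]
  rw [hA, hB, pv_perkey P R hR k]


-- ===== VERDICT (by name: the statement is the Claim_ definition above) =====
theorem build_base_reachability_graph_spec : Claim_equal_build_base_reachability_graph := by
  intro num_classes forbidden_class_pairs _dom
  unfold Spec_build_base_reachability_graph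
  exact pv_main num_classes forbidden_class_pairs
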